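-- pv_equiv track=rewrite | github.com/Kasiet2001/leetcode | find_unique_binary_string.py | findDifferentBinaryString
-- ===== SOURCE A (Python) =====
-- def findDifferentBinaryString(nums):
--     res = []
--     for i in range(len(nums)):
--         if nums[i][i] == '1':
--             res.append('0')
--         else:
--             res.append('1')
--     return "".join(res)
-- ===== SOURCE B (Python) =====
-- def findDifferentBinaryString(nums):
--     # Cantor diagonalization by structural recursion: flip the first string's first
--     # character, then recurse on the submatrix with the first row and column removed.
--     if not nums:
--         return ""
--     bit = '0' if nums[0][0] == '1' else '1'
--     return bit + findDifferentBinaryString([s[1:] for s in nums[1:]])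
-- ===== Notes on version B (the rewrite author's own statement) =====
-- stated objective: alternative
-- what changed: B replaces A's indexed loop over nums[i][i] by structural recursion on the matrix: flip the first string's first character and recurse on the submatrix with the first row and first column sliced off (no index variable at all); Pre_ excludes exactly the ragged inputs where both programs raise IndexError.
import Mathlib
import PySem

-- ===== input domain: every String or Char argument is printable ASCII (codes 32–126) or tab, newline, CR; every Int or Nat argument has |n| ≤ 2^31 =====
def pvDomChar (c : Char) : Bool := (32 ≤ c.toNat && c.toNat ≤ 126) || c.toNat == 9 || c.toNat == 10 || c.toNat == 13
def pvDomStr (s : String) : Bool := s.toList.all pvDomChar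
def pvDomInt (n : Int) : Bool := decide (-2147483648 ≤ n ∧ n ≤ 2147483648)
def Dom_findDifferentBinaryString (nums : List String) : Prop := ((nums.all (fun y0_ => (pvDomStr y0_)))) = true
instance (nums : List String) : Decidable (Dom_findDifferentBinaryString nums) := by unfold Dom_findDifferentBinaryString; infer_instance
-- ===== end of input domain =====

-- B diagonalizes by structural recursion — flip the first string's first character and
-- recurse on the submatrix with first row and first column removed — instead of A's
-- indexed loop over nums[i][i] (objective: alternative).

-- ===== PORT A =====
def findDifferentBinaryString (nums : List String) : String :=
  -- res = []; for i in range(len(nums)): if nums[i][i] == '1': res.append('0') else res.append('1'); return "".join(res)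
  -- nums[i][i] is in range on every input admitted by Pre_; the .getD defaults are never read there
  let res := (List.range nums.length).foldl (fun res (i : Nat) =>
    if (PySem.Str.pyGet? ((PySem.List.pyGet? nums (i : Int)).getD "") (i : Int)).getD ' ' == '1'
    then res ++ ["0"] else res ++ ["1"]) []
  PySem.Str.join "" res

-- ===== PORT B =====
def findDifferentBinaryString_alt (nums : List String) : String :=
  -- if not nums: return ""
  -- bit = '0' if nums[0][0] == '1' else '1'
  -- return bit + findDifferentBinaryString([s[1:] for s in nums[1:]])
  -- nums[0][0] is in range on every input admitted by Pre_; the .getD default is never read there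
  match nums with
  | [] => ""
  | s :: rest =>
    let bit := if (PySem.Str.pyGet? s (0 : Int)).getD ' ' == '1' then "0" else "1"
    bit ++ findDifferentBinaryString_alt (rest.map (fun t => PySem.Str.slice t (some 1) none))
termination_by nums.length
decreasing_by simp

-- ===== PRECONDITION & SPEC =====
-- Pre_ excludes exactly the ragged inputs on which Python A raises IndexError (nums[i][i] with len(nums[i]) <= i)
def Pre_findDifferentBinaryString (nums : List String) : Prop :=
  ∀ i ∈ List.range nums.length, i < (nums.getD i "").toList.length
instance (nums : List String) : Decidable (Pre_findDifferentBinaryString nums) := by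
  unfold Pre_findDifferentBinaryString; infer_instance
def pvWitness_findDifferentBinaryString : List String := ["01", "10"]

def Spec_findDifferentBinaryString (nums : List String) (out : String) : Prop := out = findDifferentBinaryString_alt nums
instance (nums : List String) (out : String) : Decidable (Spec_findDifferentBinaryString nums out) := by unfold Spec_findDifferentBinaryString; infer_instance

-- ===== CLAIM (what is proved, stated in full; the proofs are below) =====
def Claim_equal_findDifferentBinaryString : Prop := ∀ (nums : List String), Dom_findDifferentBinaryString nums → Pre_findDifferentBinaryString nums → Spec_findDifferentBinaryString nums (findDifferentBinaryString nums)

-- ===== LEMMAS AND PROOFS =====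

-- the flipped diagonal bit at index i (true ↔ nums[i][i] != '1'), and its character
def pvBit (nums : List String) (i : Nat) : Bool :=
  (PySem.Str.pyGet? ((PySem.List.pyGet? nums (i : Int)).getD "") (i : Int)).getD ' ' != '1'
def pvBitChar (b : Bool) : Char := if b then '1' else '0'

-- A's loop builds exactly the flipped-bit characters
theorem pvA_eq (nums : List String) :
    findDifferentBinaryString nums
      = PySem.Str.join "" ((List.range nums.length).map
          (fun i => if pvBit nums i then "1" else "0")) := by
  unfold findDifferentBinaryString
  suffices h : ∀ (l : List Nat) (acc : List String),
      l.foldl (fun res (i : Nat) =>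
        if (PySem.Str.pyGet? ((PySem.List.pyGet? nums (i : Int)).getD "") (i : Int)).getD ' ' == '1'
        then res ++ ["0"] else res ++ ["1"]) acc
      = acc ++ l.map (fun i => if pvBit nums i then "1" else "0") by
    have h0 := h (List.range nums.length) []
    rw [List.nil_append] at h0
    exact congrArg (PySem.Str.join "") h0
  intro l
  induction l with
  | nil => intro acc; simp
  | cons x xs ih =>
    intro acc
    simp only [List.foldl_cons, List.map_cons]
    rw [ih]
    simp only [pvBit, PySem.List.pyGet?_natCast, PySem.Str.pyGet?_natCast, bne_iff_ne, ne_eq,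
      ite_not, beq_iff_eq]
    split_ifs <;> simp

-- the diagonal bit of the stripped submatrix is the next diagonal bit of the full matrix
theorem pvBit_strip (s : String) (rest : List String) (i : Nat) (hi : i < rest.length) :
    pvBit (rest.map (fun t => PySem.Str.slice t (some 1) none)) i = pvBit (s :: rest) (i + 1) := by
  unfold pvBit
  rw [PySem.List.pyGet?_natCast, PySem.List.pyGet?_natCast, List.getElem?_map,
    List.getElem?_eq_getElem hi, List.getElem?_cons_succ, List.getElem?_eq_getElem hi]
  simp only [Option.map_some, Option.getD_some]
  simp [pysem]
  rw [show ((i : Int) + 1) = ((i + 1 : Nat) : Int) by push_cast; ring, PySem.List.pyGet?_natCast]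

-- B's recursion produces the flipped-bit characters
theorem pvAlt_eq (nums : List String) :
    (findDifferentBinaryString_alt nums).toList
      = (List.range nums.length).map (fun i => pvBitChar (pvBit nums i)) := by
  induction hn : nums.length using Nat.strong_induction_on generalizing nums with
  | _ n IH =>
    match nums with
    | [] => simp [findDifferentBinaryString_alt]; simp [← hn]
    | s :: rest =>
      rw [findDifferentBinaryString_alt]
      have hlen : (rest.map (fun t => PySem.Str.slice t (some 1) none)).length = rest.length := by
        simp
      have hn' : rest.length + 1 = n := by simpa using hn
      have hrec := IH rest.length (by omega) (rest.map (fun t => PySem.Str.slice t (some 1) none)) hlen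
      have htail : (findDifferentBinaryString_alt
            (rest.map (fun t => PySem.Str.slice t (some 1) none))).toList
          = (List.range rest.length).map (fun i => pvBitChar (pvBit (s :: rest) (i + 1))) := by
        rw [hrec]
        apply List.map_congr_left
        intro i hi
        rw [pvBit_strip s rest i (List.mem_range.mp hi)]
      have h0 : pvBit (s :: rest) 0 = ((PySem.Str.pyGet? s (0 : Int)).getD ' ' != '1') := by
        simp [pvBit]
      have hhead : (if (PySem.Str.pyGet? s (0 : Int)).getD ' ' == '1'
            then ("0" : String) else "1").toList = [pvBitChar (pvBit (s :: rest) 0)] := by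
        rw [h0, show ((PySem.Str.pyGet? s (0 : Int)).getD ' ' != '1')
            = !((PySem.Str.pyGet? s (0 : Int)).getD ' ' == '1') from rfl]
        generalize ((PySem.Str.pyGet? s (0 : Int)).getD ' ' == '1') = b
        cases b <;> decide
      rw [String.toList_append, htail, ← hn', List.range_succ_eq_map, List.map_cons, List.map_map,
        hhead]
      rfl

-- ===== VERDICT (by name: the statement is the Claim_ definition above) =====
theorem findDifferentBinaryString_spec : Claim_equal_findDifferentBinaryString := by
  intro nums _ _
  unfold Spec_findDifferentBinaryString
  rw [pvA_eq, ← String.toList_inj, pvAlt_eq, PySem.Str.toList_join]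
  have : (List.range nums.length).map (fun i => if pvBit nums i then "1" else "0")
      = (List.range nums.length).map (fun i => String.ofList [pvBitChar (pvBit nums i)]) := by
    apply List.map_congr_left; intro i _
    cases pvBit nums i <;> simp [pvBitChar]
  rw [this]
  simp only [List.map_map]
  have : (List.map (String.toList ∘ fun i => String.ofList [pvBitChar (pvBit nums i)])
      (List.range nums.length)) = List.map (fun c => [c])
      ((List.range nums.length).map (fun i => pvBitChar (pvBit nums i))) := by
    simp [Function.comp]
  rw [this]
  have := PySem.Chars.join_nil_singletons
    ((List.range nums.length).map (fun i => pvBitChar (pvBit nums i)))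
  simp only [show ("" : String).toList = [] from rfl] at *
  rw [this]
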